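-- pv_equiv track=rewrite | github.com/TianBoxue-lab/ProteinWordwise | src/multi_batch_process.py | split_dict_by_value_length
-- ===== SOURCE A (Python) =====
-- def split_dict_by_value_length(dictionary, n_split):
--     """
--     Split a dictionary into n sub-dictionaries such that the total lengths
--     of string values in each sub-dict are as balanced as possible.
--
--     :param data_dict: Dictionary {key: string_value}
--     :param n: Number of sub-dictionaries (bins) to create
--     :return: A list of n sub-dictionaries
--     """
--
--     # 1. Convert the dictionary into a list of (key, value) pairs
--     items = list(dictionary.items())
--     # 2. Sort items by descending length of their string value
--     items.sort(key=lambda x: len(x[1]), reverse=True)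
--     # 3. Initialize n sub-dictionaries and track their total string lengths
--     subdicts = [{} for _ in range(n_split)]
--     lengths = [0] * n_split  # keep track of cumulative string length in each sub-dict
--     # 4. Distribute the items using a greedy "smallest bin" approach
--     for key, val in items:
--         min_index = lengths.index(min(lengths))
--         subdicts[min_index][key] = val
--         lengths[min_index] += len(val)
--     return subdicts
-- ===== SOURCE B (Python) =====
-- def _reinsert(queue, entry):
--     # insert entry into an (ascending, lexicographic) sorted queue of (load, bin) pairs
--     out = []
--     j = 0
--     while j < len(queue) and not (entry < queue[j]):
--         out.append(queue[j])
--         j += 1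
--     return out + [entry] + queue[j:]
--
--
-- def split_dict_by_value_length(dictionary, n_split):
--     # Same greedy balancing as A, but the bins are kept in an ordered queue of
--     # (cumulative_length, bin_index) pairs, so each step pops the head instead of
--     # scanning lengths twice with min() and list.index().
--     items = sorted(dictionary.items(), key=lambda kv: len(kv[1]), reverse=True)
--     bins = [[] for _ in range(n_split)]
--     queue = [(0, i) for i in range(n_split)]
--     for key, val in items:
--         load, i = queue[0]
--         queue = _reinsert(queue[1:], (load + len(val), i))
--         bins[i].append((key, val))
--     return [dict(b) for b in bins]
-- ===== Notes on version B (the rewrite author's own statement) =====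
-- stated objective: alternative
-- what changed: B replaces A's per-item double scan (min(lengths) then lengths.index(...)) and its list of dicts by an ordered queue of (cumulative_length, bin_index) pairs whose head is always the target bin, reinserted at its sorted position after each placement, with per-bin lists turned into dicts only at the end.
-- outside the precondition, e.g. on split_dict_by_value_length({'a': 'xy'}, 0): A raises ValueError, B raises IndexError
import Mathlib
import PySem

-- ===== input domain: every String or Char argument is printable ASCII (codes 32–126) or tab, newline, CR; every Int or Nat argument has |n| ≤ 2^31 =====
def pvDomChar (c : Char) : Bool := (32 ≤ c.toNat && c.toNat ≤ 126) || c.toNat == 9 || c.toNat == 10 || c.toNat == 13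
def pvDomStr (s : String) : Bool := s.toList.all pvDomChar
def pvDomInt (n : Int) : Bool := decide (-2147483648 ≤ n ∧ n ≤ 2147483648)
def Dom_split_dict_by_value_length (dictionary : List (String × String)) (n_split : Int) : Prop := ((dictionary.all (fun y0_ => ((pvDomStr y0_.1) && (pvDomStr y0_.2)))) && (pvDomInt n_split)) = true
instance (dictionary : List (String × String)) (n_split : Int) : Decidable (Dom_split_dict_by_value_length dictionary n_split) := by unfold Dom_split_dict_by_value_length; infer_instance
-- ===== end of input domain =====

-- B keeps the bins in an ordered queue of (load, index) pairs and pops its head, instead of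
-- A's double scan min()+list.index() per item; equivalence of the return values is proved below.

-- ===== PORT A =====
-- one iteration of A's for-loop: min_index = lengths.index(min(lengths)); subdicts[min_index][key]=val; lengths[min_index]+=len(val)
def aStep (st : List (PySem.Dict String String) × List Int) (kv : String × String) :
    List (PySem.Dict String String) × List Int :=
  match PySem.List.min? st.2 (fun x => x) with
  | none => st            -- Python: min([]) raises ValueError; excluded by Pre_
  | some m =>
    match PySem.List.index? st.2 m with
    | none => st          -- unreachable: m ∈ st.2
    | some i =>
      (st.1.set i ((st.1.getD i PySem.Dict.empty).insert kv.1 kv.2),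
       st.2.set i (st.2.getD i 0 + PySem.Str.len kv.2))

def split_dict_by_value_length (dictionary : List (String × String)) (n_split : Int) : List (List (String × String)) :=
  let items := PySem.List.sorted (PySem.Dict.ofList dictionary).items (fun kv => PySem.Str.len kv.2) true
  let n := n_split.toNat  -- range(n_split) is empty for n_split ≤ 0
  let fin := items.foldl aStep (List.replicate n PySem.Dict.empty, List.replicate n (0 : Int))
  fin.1.map (fun d => d.items)

-- ===== PORT B =====
-- _reinsert: walk past the queue entries not lexicographically greater than the new entry
def bReinsert (e : Int × Nat) : List (Int × Nat) → List (Int × Nat)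
  | [] => [e]
  | q :: rest =>
      if e.1 < q.1 ∨ (e.1 = q.1 ∧ e.2 < q.2)   -- Python's tuple comparison entry < queue[j]
      then e :: q :: rest
      else q :: bReinsert e rest

-- one iteration of B's for-loop: load,i = queue[0]; queue = _reinsert(queue[1:], …); bins[i].append(…)
def bStep (st : List (List (String × String)) × List (Int × Nat)) (kv : String × String) :
    List (List (String × String)) × List (Int × Nat) :=
  match st.2 with
  | [] => st              -- Python: queue[0] raises IndexError; excluded by Pre_
  | (load, i) :: rest =>
      (st.1.set i (st.1.getD i [] ++ [kv]), bReinsert (load + PySem.Str.len kv.2, i) rest)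

def split_dict_by_value_length_alt (dictionary : List (String × String)) (n_split : Int) : List (List (String × String)) :=
  let items := PySem.List.sorted (PySem.Dict.ofList dictionary).items (fun kv => PySem.Str.len kv.2) true
  let n := n_split.toNat
  let fin := items.foldl bStep (List.replicate n ([] : List (String × String)), (List.range n).map (fun i => ((0 : Int), i)))
  fin.1.map (fun b => (PySem.Dict.ofList b).items)

-- ===== PRECONDITION & SPEC =====
-- On a nonempty dictionary with n_split ≤ 0 A raises ValueError (min of the empty lengths list),
-- so exactly those inputs are excluded; everywhere else A returns normally.
def Pre_split_dict_by_value_length (dictionary : List (String × String)) (n_split : Int) : Prop :=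
  dictionary = [] ∨ 1 ≤ n_split
instance (dictionary : List (String × String)) (n_split : Int) : Decidable (Pre_split_dict_by_value_length dictionary n_split) := by unfold Pre_split_dict_by_value_length; infer_instance

def pvWitness_split_dict_by_value_length : (List (String × String)) × Int :=
  ([("a", "xy"), ("b", "z")], 2)

def Spec_split_dict_by_value_length (dictionary : List (String × String)) (n_split : Int) (out : List (List (String × String))) : Prop := out = split_dict_by_value_length_alt dictionary n_split
instance (dictionary : List (String × String)) (n_split : Int) (out : List (List (String × String))) : Decidable (Spec_split_dict_by_value_length dictionary n_split out) := by unfold Spec_split_dict_by_value_length; infer_instance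

-- ===== CLAIM (what is proved, stated in full; the proofs are below) =====
def Claim_equal_split_dict_by_value_length : Prop := ∀ (dictionary : List (String × String)) (n_split : Int), Dom_split_dict_by_value_length dictionary n_split → Pre_split_dict_by_value_length dictionary n_split → Spec_split_dict_by_value_length dictionary n_split (split_dict_by_value_length dictionary n_split)

-- ===== LEMMAS AND PROOFS =====

-- lexicographic strict order on (load, index) pairs, what bReinsert's test decides
def pLt (x y : Int × Nat) : Prop := x.1 < y.1 ∨ (x.1 = y.1 ∧ x.2 < y.2)

lemma pLt_total {x y : Int × Nat} (h : x.2 ≠ y.2) : pLt x y ∨ pLt y x := by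
  unfold pLt; omega

lemma bReinsert_perm (e : Int × Nat) (q : List (Int × Nat)) : (bReinsert e q).Perm (e :: q) := by
  induction q with
  | nil => simp [bReinsert]
  | cons a t ih =>
      simp only [bReinsert]
      split
      · exact List.Perm.refl _
      · exact ((ih.cons a).trans (List.Perm.swap e a t))

lemma pLt_trans {x y z : Int × Nat} (h1 : pLt x y) (h2 : pLt y z) : pLt x z := by
  unfold pLt at *; omega

lemma bReinsert_sorted (e : Int × Nat) (q : List (Int × Nat))
    (hq : q.Pairwise pLt) (hne : ∀ x ∈ q, x.2 ≠ e.2) :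
    (bReinsert e q).Pairwise pLt := by
  induction q with
  | nil => simp [bReinsert]
  | cons a t ih =>
      simp only [bReinsert]
      rcases List.pairwise_cons.mp hq with ⟨ha, ht⟩
      split
      · rename_i hlt
        have hea : pLt e a := hlt
        refine List.pairwise_cons.mpr ⟨?_, hq⟩
        intro x hx
        rcases List.mem_cons.mp hx with rfl | hx
        · exact hea
        · exact pLt_trans hea (ha x hx)
      · rename_i hnlt
        have hnea : ¬ pLt e a := hnlt
        refine List.pairwise_cons.mpr ⟨?_, ih ht (fun x hx => hne x (List.mem_cons_of_mem _ hx))⟩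
        intro x hx
        rcases List.mem_cons.mp ((bReinsert_perm e t).mem_iff.mp hx) with hxe | hx'
        · rw [hxe]
          rcases pLt_total (x := a) (y := e) (hne a List.mem_cons_self) with h | h
          · exact h
          · exact absurd h hnea
        · exact ha x hx'

-- the head of the sorted queue names exactly min(lengths) and lengths.index(min(lengths))
lemma head_min (lens : List Int) (l : Int) (i : Nat) (rest : List (Int × Nat))
    (hperm : ((l, i) :: rest).Perm lens.zipIdx)
    (hsort : ((l, i) :: rest).Pairwise pLt) :
    i < lens.length ∧ lens[i]? = some l ∧
    PySem.List.min? lens (fun x => x) = some l ∧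
    PySem.List.index? lens l = some i := by
  have hmemq : ((l, i) : Int × Nat) ∈ lens.zipIdx := hperm.mem_iff.mp (List.mem_cons_self)
  have hget : lens[i]? = some l := List.mk_mem_zipIdx_iff_getElem?.mp hmemq
  have hi : i < lens.length := (List.getElem?_eq_some_iff.mp hget).1
  have hgetE : lens[i] = l := by
    have := List.getElem?_eq_some_iff.mp hget; exact this.2
  have hlmem : l ∈ lens := by rw [← hgetE]; exact List.getElem_mem hi
  -- l is ≤ every element of lens
  have hle : ∀ y ∈ lens, l ≤ y := by
    intro y hy
    obtain ⟨j, hj, hjy⟩ := List.mem_iff_getElem.mp hy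
    have hyz : ((y, j) : Int × Nat) ∈ lens.zipIdx :=
      List.mk_mem_zipIdx_iff_getElem?.mpr (by simp [hj, hjy])
    rcases List.mem_cons.mp (hperm.symm.mem_iff.mp hyz) with he | hr
    · injection he with hy hj'; omega
    · have := (List.pairwise_cons.mp hsort).1 _ hr
      unfold pLt at this; simp only at this; omega
  -- no earlier occurrence of l
  have hfirst : ∀ j, j < i → ∀ hj : j < lens.length, lens[j] ≠ l := by
    intro j hji hj hjl
    have hjz : ((l, j) : Int × Nat) ∈ lens.zipIdx :=
      List.mk_mem_zipIdx_iff_getElem?.mpr (by simp [hj, hjl])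
    rcases List.mem_cons.mp (hperm.symm.mem_iff.mp hjz) with he | hr
    · injection he with hl' hj'; omega
    · have := (List.pairwise_cons.mp hsort).1 _ hr
      unfold pLt at this; simp only at this; omega
  refine ⟨hi, hget, ?_, ?_⟩
  · -- min? lens id = some l
    obtain ⟨m, hm⟩ : ∃ m, PySem.List.min? lens (fun x => x) = some m := by
      cases hh : PySem.List.min? lens (fun x => x) with
      | none =>
          exact absurd ((PySem.List.min?_eq_none_iff lens (fun x => x)).mp hh)
            (List.ne_nil_of_mem hlmem)
      | some v => exact ⟨v, rfl⟩
    have h1 : m ≤ l := PySem.List.min?_isMin hm l hlmem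
    have h2 : l ≤ m := hle m (PySem.List.min?_mem hm)
    rw [hm, le_antisymm h1 h2]
  · -- index? lens l = some i
    rw [PySem.List.index?_eq_some_iff]
    refine ⟨lens.take i, lens.drop (i + 1), ?_, by simp [hi.le], ?_⟩
    · conv_lhs => rw [← List.take_append_drop i lens]
      rw [List.drop_eq_getElem_cons hi, hgetE]
    · intro hlmemtake
      obtain ⟨j, hj, hjl⟩ := List.mem_iff_getElem.mp hlmemtake
      have hjlen : j < lens.length := by
        have := hj; simp [List.length_take] at this; omega
      have hjlt : j < i := by simp [List.length_take] at hj; omega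
      rw [List.getElem_take] at hjl
      exact hfirst j hjlt hjlen hjl

lemma zipIdx_set (lens : List Int) (i : Nat) (v : Int) (_h : i < lens.length) :
    (lens.set i v).zipIdx = lens.zipIdx.set i (v, i) := by
  apply List.ext_getElem (by simp)
  intro j h1 h2
  have hj : j < lens.length := by simpa using h1
  rw [List.getElem_zipIdx, List.getElem_set, List.getElem_set]
  by_cases hij : i = j
  · simp [hij]
  · simp [hij, List.getElem_zipIdx]

-- b built back into a dict is b itself when its keys are distinct
lemma ofList_items_self (b : List (String × String)) (h : (b.map Prod.fst).Nodup) :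
    (PySem.Dict.ofList b).items = b := by
  have hrfl : PySem.Dict.ofList b
      = List.foldl (fun d (a : String × String) => d.insert a.1 a.2) PySem.Dict.empty b := rfl
  rw [hrfl]
  have := PySem.Dict.items_foldl_insert_fresh (l := b) (k := Prod.fst) (v := Prod.snd)
      (d := PySem.Dict.empty) (fun a _ => PySem.Dict.contains_empty a.1) h
  simpa using this

lemma getD_set {α : Type} (l : List α) (i j : Nat) (x d : α) (hj : j < l.length) :
    (l.set i x).getD j d = if i = j then x else l.getD j d := by
  rw [List.getD_eq_getElem _ _ (by simpa using hj), List.getElem_set]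
  by_cases hij : i = j
  · simp [hij]
  · simp [hij, List.getElem?_eq_getElem hj]

-- the main loop invariant: running the two loops from related states gives equal outputs
lemma loop_eq (r : List (String × String)) (n : Nat)
    (subs : List (PySem.Dict String String)) (lens : List Int)
    (bins : List (List (String × String))) (queue : List (Int × Nat))
    (hs : subs.length = n) (hl : lens.length = n) (hb : bins.length = n)
    (hib : ∀ i, i < n → (subs.getD i PySem.Dict.empty).items = bins.getD i [])
    (hperm : queue.Perm lens.zipIdx)
    (hsort : queue.Pairwise pLt)
    (hkeys : (r.map Prod.fst).Nodup)
    (hdisj : ∀ i, ∀ p ∈ bins.getD i [], p.1 ∉ r.map Prod.fst)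
    (hbk : ∀ i, ((bins.getD i []).map Prod.fst).Nodup)
    (hn : n ≠ 0 ∨ r = []) :
    (r.foldl aStep (subs, lens)).1.map (fun d => d.items) =
      (r.foldl bStep (bins, queue)).1.map (fun b => (PySem.Dict.ofList b).items) := by
  induction r generalizing subs lens bins queue with
  | nil =>
      simp only [List.foldl_nil]
      apply List.ext_getElem (by simp [hs, hb])
      intro j h1 h2
      have hj : j < n := by simpa [hs] using h1
      have hjs : j < subs.length := by rw [hs]; exact hj
      have hjb : j < bins.length := by rw [hb]; exact hj
      simp only [List.getElem_map]
      have hib' := hib j hj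
      rw [List.getD_eq_getElem _ _ hjs, List.getD_eq_getElem _ _ hjb] at hib'
      have hbk' := hbk j
      rw [List.getD_eq_getElem _ _ hjb] at hbk'
      rw [hib', ofList_items_self _ hbk']
  | cons kv rest ih =>
      have hn' : n ≠ 0 := by
        rcases hn with h | h
        · exact h
        · simp at h
      have hlne : lens ≠ [] := by
        intro hnil; rw [hnil] at hl; simp at hl; omega
      obtain ⟨⟨l, i⟩, qrest, rfl⟩ : ∃ p q', queue = p :: q' := by
        cases queue with
        | nil =>
            exfalso
            have hz : lens.zipIdx = [] := List.Perm.eq_nil hperm.symm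
            exact hlne (by simpa using hz)
        | cons p q' => exact ⟨p, q', rfl⟩
      obtain ⟨hi_lt, hgetl, hmin, hidx⟩ := head_min lens l i qrest hperm hsort
      have hin : i < n := by rw [hl] at hi_lt; exact hi_lt
      have hgE : lens[i] = l := (List.getElem?_eq_some_iff.mp hgetl).2
      have hgl : lens.getD i 0 = l := by rw [List.getD_eq_getElem _ _ hi_lt]; exact hgE
      simp only [List.foldl_cons]
      have hidx' : List.idxOf? l lens = some i := by
        rw [← PySem.List.index?_eq_idxOf?]; exact hidx
      have hAstep : aStep (subs, lens) kv
          = (subs.set i ((subs.getD i PySem.Dict.empty).insert kv.1 kv.2),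
             lens.set i (l + PySem.Str.len kv.2)) := by
        simp [aStep, hmin, hidx', hgetl]
      have hBstep : bStep (bins, (l, i) :: qrest) kv
          = (bins.set i (bins.getD i [] ++ [kv]), bReinsert (l + PySem.Str.len kv.2, i) qrest) := rfl
      rw [hAstep, hBstep]
      -- indices in the queue tail all differ from i
      have hsnd : ∀ x ∈ qrest, x.2 ≠ i := by
        have hzn : (lens.zipIdx.map Prod.snd).Nodup := by
          have hze : lens.zipIdx.map Prod.snd = List.range lens.length := by
            apply List.ext_getElem (by simp)
            intro j hj1 hj2
            simp
          rw [hze]; exact List.nodup_range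
        have hnd : (((l, i) :: qrest).map Prod.snd).Nodup :=
          ((hperm.map Prod.snd).nodup_iff).mpr hzn
        simp only [List.map_cons, List.nodup_cons] at hnd
        intro x hx he
        exact hnd.1 (List.mem_map.mpr ⟨x, hx, he⟩)
      have hsort_rest : qrest.Pairwise pLt := (List.pairwise_cons.mp hsort).2
      -- the new queue matches the updated lengths
      have hperm' : (bReinsert (l + PySem.Str.len kv.2, i) qrest).Perm
          (lens.set i (l + PySem.Str.len kv.2)).zipIdx := by
        rw [zipIdx_set lens i _ hi_lt]
        have hizlen : i < lens.zipIdx.length := by simpa using hi_lt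
        have hzi : lens.zipIdx[i]'hizlen = (l, i) := by
          rw [List.getElem_zipIdx]; simp [hgE]
        have hdec : lens.zipIdx = lens.zipIdx.take i ++ (l, i) :: lens.zipIdx.drop (i + 1) := by
          conv_lhs => rw [← List.take_append_drop i lens.zipIdx]
          rw [List.drop_eq_getElem_cons hizlen, hzi]
        have hset : lens.zipIdx.set i (l + PySem.Str.len kv.2, i)
            = lens.zipIdx.take i ++ (l + PySem.Str.len kv.2, i) :: lens.zipIdx.drop (i + 1) := by
          rw [List.set_eq_take_append_cons_drop, if_pos hizlen]
        have hqr : qrest.Perm (lens.zipIdx.take i ++ lens.zipIdx.drop (i + 1)) := by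
          have h1 : ((l, i) :: qrest).Perm
              ((l, i) :: (lens.zipIdx.take i ++ lens.zipIdx.drop (i + 1))) := by
            refine hperm.trans ?_
            conv_lhs => rw [hdec]
            exact List.perm_middle
          exact h1.cons_inv
        rw [hset]
        exact ((bReinsert_perm _ _).trans (hqr.cons _)).trans List.perm_middle.symm
      have hsort' : (bReinsert (l + PySem.Str.len kv.2, i) qrest).Pairwise pLt :=
        bReinsert_sorted _ _ hsort_rest (fun x hx => hsnd x hx)
      -- the bin i does not yet contain kv's key
      have hkv_mem : kv.1 ∈ (kv :: rest).map Prod.fst := by simp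
      have hkeys_eq : (subs.getD i PySem.Dict.empty).keys = (bins.getD i []).map Prod.fst := by
        show (subs.getD i PySem.Dict.empty).items.map (·.1) = _
        rw [hib i hin]
      have hcont : (subs.getD i PySem.Dict.empty).contains kv.1 = false := by
        cases hc : (subs.getD i PySem.Dict.empty).contains kv.1 with
        | false => rfl
        | true =>
            exfalso
            rw [PySem.Dict.contains_iff_mem_keys] at hc
            rw [hkeys_eq] at hc
            have hmemk := hc
            obtain ⟨p, hp, hpe⟩ := List.mem_map.mp hmemk
            exact hdisj i p hp (hpe ▸ hkv_mem)
      have hitems : ((subs.getD i PySem.Dict.empty).insert kv.1 kv.2).items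
          = bins.getD i [] ++ [kv] := by
        rw [PySem.Dict.items_insert, hcont]
        simpa using congrArg (· ++ [kv]) (hib i hin)
      -- the key of kv appears nowhere in rest nor in any bin
      have hkrest : kv.1 ∉ rest.map Prod.fst := by
        simp only [List.map_cons, List.nodup_cons] at hkeys
        exact hkeys.1
      have hkeys' : (rest.map Prod.fst).Nodup := by
        simp only [List.map_cons, List.nodup_cons] at hkeys
        exact hkeys.2
      -- apply the induction hypothesis to the updated states
      refine ih _ _ _ _ (by simp [hs]) (by simp [hl]) (by simp [hb]) ?_ hperm' hsort'
        hkeys' ?_ ?_ (Or.inl hn')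
      · -- hib
        intro j hj
        rw [getD_set _ i j _ _ (by rw [hs]; exact hj), getD_set _ i j _ _ (by rw [hb]; exact hj)]
        by_cases hij : i = j
        · simp only [hij, if_true]
          rw [← hij, hitems]
        · simp only [hij, if_false]
          exact hib j hj
      · -- hdisj
        intro j p hp
        by_cases hjb : j < bins.length
        · rw [getD_set _ i j _ _ hjb] at hp
          by_cases hij : i = j
          · rw [if_pos hij] at hp
            rcases List.mem_append.mp hp with hold | hnew
            · intro hmem
              exact hdisj i p hold (List.mem_cons_of_mem _ (by simpa using hmem))
            · have : p = kv := by simpa using hnew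
              rw [this]
              exact hkrest
          · rw [if_neg hij] at hp
            intro hmem
            exact hdisj j p hp (List.mem_cons_of_mem _ (by simpa using hmem))
        · rw [List.getD_eq_default _ _ (by simpa using Nat.le_of_not_lt hjb)] at hp
          exact absurd hp (List.not_mem_nil)
      · -- hbk
        intro j
        by_cases hjb : j < bins.length
        · rw [getD_set _ i j _ _ hjb]
          by_cases hij : i = j
          · rw [if_pos hij]
            simp only [List.map_append, List.map_cons, List.map_nil]
            rw [List.nodup_append]
            refine ⟨hbk i, by simp, ?_⟩
            intro a ha b hbmem
            have hbk1 : b = kv.1 := by simpa using hbmem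
            obtain ⟨p, hp, hpe⟩ := List.mem_map.mp ha
            intro heq
            exact hdisj i p hp (by rw [hpe, heq, hbk1]; exact hkv_mem)
          · rw [if_neg hij]
            exact hbk j
        · rw [List.getD_eq_default _ _ (by simpa using Nat.le_of_not_lt hjb)]
          simp

-- the initial bins are all empty
lemma getD_replicate_nil (n j : Nat) :
    (List.replicate n ([] : List (String × String))).getD j [] = [] := by
  rcases Nat.lt_or_ge j n with h | h
  · rw [List.getD_eq_getElem _ _ (by simpa using h)]
    simp
  · rw [List.getD_eq_default _ _ (by simpa using h)]

-- zipIdx of the initial all-zero length list is the initial queue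
lemma zipIdx_replicate_zero (n : Nat) :
    (List.replicate n (0 : Int)).zipIdx = (List.range n).map (fun i => ((0 : Int), i)) := by
  apply List.ext_getElem (by simp)
  intro j h1 h2
  simp [List.getElem_zipIdx]

-- ===== VERDICT (by name: the statement is the Claim_ definition above) =====
theorem split_dict_by_value_length_spec : Claim_equal_split_dict_by_value_length := by
  intro dictionary n_split _hdom hpre
  unfold Spec_split_dict_by_value_length
  simp only [split_dict_by_value_length, split_dict_by_value_length_alt]
  refine loop_eq _ n_split.toNat _ _ _ _ (by simp) (by simp) (by simp) ?_ ?_ ?_ ?_ ?_ ?_ ?_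
  · intro i hi
    rw [List.getD_eq_getElem _ _ (by simpa using hi), getD_replicate_nil]
    simp only [List.getElem_replicate]
    rfl
  · rw [zipIdx_replicate_zero]
  · refine (List.pairwise_map).mpr ?_
    refine (List.pairwise_lt_range).imp ?_
    intro a b hab
    exact Or.inr ⟨rfl, hab⟩
  · have h1 : (PySem.List.sorted (PySem.Dict.ofList dictionary).items
        (fun kv => PySem.Str.len kv.2) true).Perm (PySem.Dict.ofList dictionary).items :=
      PySem.List.sorted_perm _ _ _
    have h2 : ((PySem.Dict.ofList dictionary).items.map Prod.fst).Nodup :=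
      PySem.Dict.nodup_keys_ofList dictionary
    exact ((h1.map Prod.fst).nodup_iff).mpr h2
  · intro i p hp
    rw [getD_replicate_nil] at hp
    exact absurd hp (List.not_mem_nil)
  · intro i
    rw [getD_replicate_nil]
    simp
  · rcases hpre with h | h
    · right
      rw [h]
      exact (PySem.List.sorted_eq_nil_iff _ _ _).mpr rfl
    · left
      omega
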